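-- pv_equiv track=rewrite | github.com/adamdprice/hubspot-xero-bridge | app/hubspot_webhook_verify.py | _decode_uri_for_hubspot_v3
-- ===== SOURCE A (Python) =====
-- def _decode_uri_for_hubspot_v3(uri: str) -> str:
--     """Decode percent-encoding for characters HubSpot lists for v3 validation."""
--     for enc, dec in (
--         ("%3A", ":"),
--         ("%2F", "/"),
--         ("%3F", "?"),
--         ("%40", "@"),
--         ("%21", "!"),
--         ("%24", "$"),
--         ("%27", "'"),
--         ("%28", "("),
--         ("%29", ")"),
--         ("%2A", "*"),
--         ("%2C", ","),
--         ("%3B", ";"),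
--     ):
--         uri = uri.replace(enc, dec)
--     return uri
-- ===== SOURCE B (Python) =====
-- _TABLE = {
--     "3A": ":", "2F": "/", "3F": "?", "40": "@", "21": "!", "24": "$",
--     "27": "'", "28": "(", "29": ")", "2A": "*", "2C": ",", "3B": ";",
-- }
--
--
-- def _decode_uri_for_hubspot_v3(uri: str) -> str:
--     """Decode percent-encoding for characters HubSpot lists for v3 validation."""
--     out = []
--     i = 0
--     n = len(uri)
--     while i < n:
--         if uri[i] == "%" and uri[i + 1:i + 3] in _TABLE:
--             out.append(_TABLE[uri[i + 1:i + 3]])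
--             i += 3
--         else:
--             out.append(uri[i])
--             i += 1
--     return "".join(out)
-- ===== Notes on version B (the rewrite author's own statement) =====
-- stated objective: alternative
-- what changed: Replaced A's twelve sequential full-string str.replace passes with a single left-to-right scan that looks each three-character percent-code up in a dict and otherwise copies the character.
import Mathlib
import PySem

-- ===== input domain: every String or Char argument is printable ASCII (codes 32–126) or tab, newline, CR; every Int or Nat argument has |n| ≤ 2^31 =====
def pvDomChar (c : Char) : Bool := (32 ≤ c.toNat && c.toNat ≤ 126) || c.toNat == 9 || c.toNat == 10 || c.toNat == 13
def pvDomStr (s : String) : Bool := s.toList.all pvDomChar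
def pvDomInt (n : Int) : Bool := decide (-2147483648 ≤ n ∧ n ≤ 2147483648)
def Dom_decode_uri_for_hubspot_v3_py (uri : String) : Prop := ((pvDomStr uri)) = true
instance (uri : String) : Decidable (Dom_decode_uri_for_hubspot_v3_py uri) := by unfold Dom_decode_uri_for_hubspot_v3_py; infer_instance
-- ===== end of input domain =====

-- B replaces A's twelve sequential full-string `.replace` passes by a single left-to-right
-- scan with a table of the twelve percent-codes; same return value, no side effects.

-- ===== PORT A =====
-- A: for (enc, dec) in (...): uri = uri.replace(enc, dec); return uri
def decode_uri_for_hubspot_v3_py (uri : String) : String :=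
  ([("%3A", ":"), ("%2F", "/"), ("%3F", "?"), ("%40", "@"), ("%21", "!"), ("%24", "$"),
    ("%27", "'"), ("%28", "("), ("%29", ")"), ("%2A", "*"), ("%2C", ","), ("%3B", ";")]).foldl
    (fun u p => PySem.Str.replace u p.1 p.2) uri

-- ===== PORT B =====
-- B's module-level table _TABLE (values are one-character strings, ported as Char)
def pvTable : PySem.Dict String Char :=
  PySem.Dict.mk [("3A", ':'), ("2F", '/'), ("3F", '?'), ("40", '@'), ("21", '!'), ("24", '$'),
    ("27", '\''), ("28", '('), ("29", ')'), ("2A", '*'), ("2C", ','), ("3B", ';')]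

-- B's while loop over the characters: on '%' followed by a two-char code in the table
-- emit the decoded char and advance 3, else emit the char and advance 1
def pvAltGo : List Char → List Char
  | [] => []
  | c :: rest =>
    match (if c = '%' then pvTable.get? (String.ofList (rest.take 2)) else none) with
    | some d => d :: pvAltGo (rest.drop 2)
    | none => c :: pvAltGo rest
termination_by l => l.length
decreasing_by all_goals (simp; try omega)

def decode_uri_for_hubspot_v3_py_alt (uri : String) : String :=
  String.ofList (pvAltGo uri.toList)

-- ===== PRECONDITION & SPEC =====
def Spec_decode_uri_for_hubspot_v3_py (uri : String) (out : String) : Prop := out = decode_uri_for_hubspot_v3_py_alt uri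
instance (uri : String) (out : String) : Decidable (Spec_decode_uri_for_hubspot_v3_py uri out) := by unfold Spec_decode_uri_for_hubspot_v3_py; infer_instance

-- ===== CLAIM (what is proved, stated in full; the proofs are below) =====
def Claim_equal_decode_uri_for_hubspot_v3_py : Prop := ∀ (uri : String), Dom_decode_uri_for_hubspot_v3_py uri → Spec_decode_uri_for_hubspot_v3_py uri (decode_uri_for_hubspot_v3_py uri)

-- ===== LEMMAS AND PROOFS =====

-- pvRep x y d l = l.replace "%xy" "d" (one of A's passes), as a clean structural recursion
def pvRep (x y d : Char) : List Char → List Char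
  | [] => []
  | c :: t => if ['%', x, y].isPrefixOf (c :: t) then d :: pvRep x y d (t.drop 2) else c :: pvRep x y d t
termination_by l => l.length
decreasing_by all_goals (simp; try omega)

lemma pvRep_nil (x y d : Char) : pvRep x y d [] = [] := by rw [pvRep]

lemma pvRep_hit (x y d : Char) (t : List Char) : pvRep x y d ('%' :: x :: y :: t) = d :: pvRep x y d t := by
  rw [pvRep]; simp [List.isPrefixOf]

lemma pvRep_miss (x y d c : Char) (t : List Char) (h : ¬ (['%', x, y] <+: (c :: t))) :
    pvRep x y d (c :: t) = c :: pvRep x y d t := by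
  rw [pvRep, if_neg (by simpa [List.isPrefixOf_iff_prefix] using h)]

lemma pvRep_cons_ne (x y d c : Char) (t : List Char) (h : c ≠ '%') :
    pvRep x y d (c :: t) = c :: pvRep x y d t := by
  apply pvRep_miss; simp [List.cons_prefix_cons]; intro h'; exact absurd h'.symm h

lemma pvGo_eq (x y d : Char) : ∀ (fuel : Nat) (l acc : List Char), l.length ≤ fuel →
    PySem.Chars.replace.go ['%', x, y] [d] fuel l acc = acc.reverse ++ pvRep x y d l := by
  intro fuel
  induction fuel with
  | zero => intro l acc h
            have hl : l = [] := by cases l with | nil => rfl | cons a t => simp at h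
            subst hl; rw [PySem.Chars.replace.go, pvRep_nil]
  | succ n ih =>
    intro l acc h
    cases l with
    | nil =>
      rw [PySem.Chars.replace.go, pvRep_nil]
      · simp
      · omega
    | cons c t =>
      rw [PySem.Chars.replace.go, pvRep]
      cases hp : List.isPrefixOf ['%', x, y] (c :: t) with
      | true =>
        simp only [if_true]
        rw [ih _ _ (by simp at h ⊢; omega)]
        simp
      | false =>
        rw [if_neg (by simp), if_neg (by simp)]
        rw [ih _ _ (by simp at h ⊢; omega)]
        simp

lemma replace_eq_pvRep (x y d : Char) (l : List Char) :
    PySem.Chars.replace l ['%', x, y] [d] = pvRep x y d l := by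
  rw [PySem.Chars.replace]
  simp only [List.isEmpty]
  exact pvGo_eq x y d l.length l [] le_rfl

-- the twelve (first hex char, second hex char, decoded char) triples, in A's order
def pvTriples : List (Char × Char × Char) :=
  [('3', 'A', ':'), ('2', 'F', '/'), ('3', 'F', '?'), ('4', '0', '@'), ('2', '1', '!'),
   ('2', '4', '$'), ('2', '7', '\''), ('2', '8', '('), ('2', '9', ')'), ('2', 'A', '*'),
   ('2', 'C', ','), ('3', 'B', ';')]

def pvStep (s : List Char) (p : Char × Char × Char) : List Char := pvRep p.1 p.2.1 p.2.2 s

def pvComp (l : List Char) : List Char := pvTriples.foldl pvStep l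

-- A's composition of the twelve passes, on lists
lemma portA_eq (uri : String) : decode_uri_for_hubspot_v3_py uri = String.ofList (pvComp uri.toList) := by
  unfold decode_uri_for_hubspot_v3_py pvComp pvTriples pvStep
  simp only [List.foldl, PySem.Str.replace, String.toList_ofList,
    show "%3A".toList = ['%','3','A'] from rfl, show "%2F".toList = ['%','2','F'] from rfl,
    show "%3F".toList = ['%','3','F'] from rfl, show "%40".toList = ['%','4','0'] from rfl,
    show "%21".toList = ['%','2','1'] from rfl, show "%24".toList = ['%','2','4'] from rfl,
    show "%27".toList = ['%','2','7'] from rfl, show "%28".toList = ['%','2','8'] from rfl,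
    show "%29".toList = ['%','2','9'] from rfl, show "%2A".toList = ['%','2','A'] from rfl,
    show "%2C".toList = ['%','2','C'] from rfl, show "%3B".toList = ['%','3','B'] from rfl,
    show ":".toList = [':'] from rfl, show "/".toList = ['/'] from rfl,
    show "?".toList = ['?'] from rfl, show "@".toList = ['@'] from rfl,
    show "!".toList = ['!'] from rfl, show "$".toList = ['$'] from rfl,
    show "'".toList = ['\''] from rfl, show "(".toList = ['('] from rfl,
    show ")".toList = [')'] from rfl, show "*".toList = ['*'] from rfl,
    show ",".toList = [','] from rfl, show ";".toList = [';'] from rfl,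
    replace_eq_pvRep]

-- "no percent-code pair starts W"
def pvNoCode (W : List Char) : Prop := ∀ p ∈ pvTriples, ¬ ([p.1, p.2.1] <+: W)

lemma pvRep_head (x y d : Char) (t : List Char) :
    pvRep x y d t = [] ∨ (∃ r, pvRep x y d t = d :: r) ∨ (∃ c t2 r, t = c :: t2 ∧ pvRep x y d t = c :: r) := by
  cases t with
  | nil => exact Or.inl (pvRep_nil x y d)
  | cons c t2 =>
    rw [pvRep]
    by_cases hp : List.isPrefixOf ['%', x, y] (c :: t2) = true
    · rw [if_pos hp]; exact Or.inr (Or.inl ⟨_, rfl⟩)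
    · rw [if_neg hp]; exact Or.inr (Or.inr ⟨c, t2, _, rfl, rfl⟩)

-- a pass never creates a new percent-code at the front: decoded chars are not hex digits
lemma pvRep_pres (x y d : Char) (hd : ∀ p ∈ pvTriples, p.1 ≠ d ∧ p.2.1 ≠ d)
    (W : List Char) (hW : pvNoCode W) : pvNoCode (pvRep x y d W) := by
  intro p hp hpre
  cases W with
  | nil => rw [pvRep_nil] at hpre; simp at hpre
  | cons c t =>
    rw [pvRep] at hpre
    by_cases hpf : List.isPrefixOf ['%', x, y] (c :: t) = true
    · rw [if_pos hpf] at hpre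
      exact (hd p hp).1 (List.cons_prefix_cons.mp hpre).1
    · rw [if_neg hpf] at hpre
      obtain ⟨h1, h2⟩ := List.cons_prefix_cons.mp hpre
      rcases pvRep_head x y d t with h0 | ⟨r, hr⟩ | ⟨c2, t2, r, ht, hr⟩
      · rw [h0] at h2; simp at h2
      · rw [hr] at h2
        exact (hd p hp).2 (List.cons_prefix_cons.mp h2).1
      · rw [hr] at h2
        have h3 : p.2.1 = c2 := (List.cons_prefix_cons.mp h2).1
        exact hW p hp (by rw [ht, h1, h3]; exact List.cons_prefix_cons.mpr ⟨rfl, List.cons_prefix_cons.mpr ⟨rfl, List.nil_prefix⟩⟩)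

-- every decoded char avoids the hex chars used by code pairs, and is not '%'
lemma pvTriples_ok : ∀ p ∈ pvTriples, (∀ q ∈ pvTriples, q.1 ≠ p.2.2 ∧ q.2.1 ≠ p.2.2) ∧ p.2.2 ≠ '%' := by decide

lemma fold_cons_ne (ts : List (Char × Char × Char)) (c : Char) (hc : c ≠ '%') :
    ∀ W, ts.foldl pvStep (c :: W) = c :: ts.foldl pvStep W := by
  induction ts with
  | nil => intro W; rfl
  | cons p ts ih =>
    intro W
    simp only [List.foldl, pvStep]
    rw [pvRep_cons_ne _ _ _ _ _ hc, ih]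

lemma fold_miss (ts : List (Char × Char × Char)) (hts : ∀ p ∈ ts, p ∈ pvTriples) :
    ∀ W, pvNoCode W → ts.foldl pvStep ('%' :: W) = '%' :: ts.foldl pvStep W := by
  induction ts with
  | nil => intro W _; rfl
  | cons p ts ih =>
    intro W hW
    have hpmem : p ∈ pvTriples := hts p (List.mem_cons_self ..)
    simp only [List.foldl, pvStep]
    rw [pvRep_miss _ _ _ _ _ (by
      intro hpre
      exact hW p hpmem (List.cons_prefix_cons.mp hpre).2)]
    exact ih (fun q hq => hts q (List.mem_cons_of_mem _ hq)) _
      (pvRep_pres _ _ _ (pvTriples_ok p hpmem).1 W hW)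

lemma fold_hit (ts : List (Char × Char × Char)) (a b dd : Char)
    (ha : a ≠ '%') (hb : b ≠ '%') (hdd : dd ≠ '%')
    (hfind : (ts.find? (fun p => p.1 == a && p.2.1 == b)).map (·.2.2) = some dd) :
    ∀ W, ts.foldl pvStep ('%' :: a :: b :: W) = dd :: ts.foldl pvStep W := by
  induction ts with
  | nil => simp at hfind
  | cons p ts ih =>
    intro W
    by_cases hpb : (p.1 == a && p.2.1 == b) = true
    · rw [List.find?_cons_of_pos (p := fun q : Char × Char × Char => q.1 == a && q.2.1 == b) hpb] at hfind
      simp only [Option.map_some, Option.some.injEq] at hfind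
      obtain ⟨h1, h2⟩ : p.1 = a ∧ p.2.1 = b := by simpa using hpb
      simp only [List.foldl, pvStep]
      rw [← h1, ← h2, pvRep_hit, hfind]
      rw [fold_cons_ne ts dd hdd]
    · rw [List.find?_cons_of_neg (p := fun q : Char × Char × Char => q.1 == a && q.2.1 == b) hpb] at hfind
      have hne : ¬ (p.1 = a ∧ p.2.1 = b) := by simpa using hpb
      simp only [List.foldl, pvStep]
      rw [pvRep_miss _ _ _ _ _ (by
        intro hpre
        obtain ⟨h1, h2⟩ := List.cons_prefix_cons.mp hpre
        obtain ⟨h3, h4⟩ := List.cons_prefix_cons.mp h2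
        obtain ⟨h5, _⟩ := List.cons_prefix_cons.mp h4
        exact hne ⟨h3, h5⟩)]
      rw [pvRep_cons_ne _ _ _ _ _ ha, pvRep_cons_ne _ _ _ _ _ hb]
      exact ih hfind _

-- table lookup characterisations
lemma table_some (a b d : Char) (h : pvTable.get? (String.ofList [a, b]) = some d) :
    a ≠ '%' ∧ b ≠ '%' ∧ d ≠ '%' ∧
      (pvTriples.find? (fun p => p.1 == a && p.2.1 == b)).map (·.2.2) = some d := by
  have hm := PySem.Dict.mem_items_of_get?_eq_some pvTable h
  simp only [pvTable, List.mem_cons, List.not_mem_nil, or_false,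
    Prod.mk.injEq] at hm
  rcases hm with ⟨h1, h2⟩ | ⟨h1, h2⟩ | ⟨h1, h2⟩ | ⟨h1, h2⟩ | ⟨h1, h2⟩ | ⟨h1, h2⟩ | ⟨h1, h2⟩ |
    ⟨h1, h2⟩ | ⟨h1, h2⟩ | ⟨h1, h2⟩ | ⟨h1, h2⟩ | ⟨h1, h2⟩ <;>
  · have hl := congrArg String.toList h1
    simp only [String.toList_ofList] at hl
    obtain ⟨ha', hb'⟩ : _ ∧ _ := by
      injection hl with x1 x2; injection x2 with y1 y2; exact ⟨x1, y1⟩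
    subst ha'; subst hb'; subst h2
    exact ⟨by decide, by decide, by decide, by decide⟩

lemma table_none (a b : Char) (h : pvTable.get? (String.ofList [a, b]) = none) :
    ∀ p ∈ pvTriples, ¬ (p.1 = a ∧ p.2.1 = b) := by
  intro p hp hab
  obtain ⟨h1, h2⟩ := hab
  subst h1; subst h2
  fin_cases hp <;> exact absurd h (by decide)

lemma table_short (l : List Char) (hlen : l.length ≠ 2) :
    pvTable.get? (String.ofList l) = none := by
  have hne : ∀ (s : String), s.toList.length = 2 → (s == String.ofList l) = false := by
    intro s hs
    apply beq_eq_false_iff_ne.mpr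
    intro he
    have := congrArg String.toList he
    rw [String.toList_ofList] at this
    exact hlen (by rw [← this, hs])
  simp only [pvTable, PySem.Dict.get?_mk_cons]
  rw [hne _ (by decide), hne _ (by decide), hne _ (by decide), hne _ (by decide),
    hne _ (by decide), hne _ (by decide), hne _ (by decide), hne _ (by decide),
    hne _ (by decide), hne _ (by decide), hne _ (by decide), hne _ (by decide)]
  simp [PySem.Dict.get?]

lemma fold_nil : pvComp [] = [] := by
  unfold pvComp
  have : ∀ ts : List (Char × Char × Char), ts.foldl pvStep [] = [] := by
    intro ts
    induction ts with
    | nil => rfl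
    | cons p ts ih => simp only [List.foldl, pvStep, pvRep_nil]; exact ih
  exact this _

lemma altGo_nil : pvAltGo [] = [] := by rw [pvAltGo]

lemma comp_eq_alt : ∀ (n : Nat) (l : List Char), l.length ≤ n → pvComp l = pvAltGo l := by
  intro n
  induction n with
  | zero =>
    intro l h
    have hl : l = [] := by cases l with | nil => rfl | cons c t => simp at h
    subst hl; rw [fold_nil, altGo_nil]
  | succ n ih =>
    intro l hl
    cases l with
    | nil => rw [fold_nil, altGo_nil]
    | cons c rest =>
      by_cases hc : c = '%'
      · subst hc
        rcases rest with _ | ⟨a, rest2⟩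
        · have hcomp : pvComp ['%'] = '%' :: pvComp [] :=
            fold_miss pvTriples (fun p hp => hp) [] (by intro p hp hpre; simp at hpre)
          rw [hcomp, fold_nil]
          conv_rhs => rw [pvAltGo]
          simp [table_short [] (by simp), altGo_nil]
        · rcases rest2 with _ | ⟨b, t⟩
          · have hW : pvNoCode [a] := by
              intro p hp hpre
              have := hpre.length_le
              simp at this
            have hcomp : pvComp ('%' :: [a]) = '%' :: pvComp [a] :=
              fold_miss pvTriples (fun p hp => hp) [a] hW
            rw [hcomp, ih [a] (by simp at hl ⊢; omega)]
            conv_rhs => rw [pvAltGo]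
            simp [table_short [a] (by simp)]
          · cases htab : pvTable.get? (String.ofList [a, b]) with
            | some d =>
              obtain ⟨ha, hb, hdd, hfind⟩ := table_some a b d htab
              have hcomp : pvComp ('%' :: a :: b :: t) = d :: pvComp t :=
                fold_hit pvTriples a b d ha hb hdd hfind t
              rw [hcomp, ih t (by simp at hl ⊢; omega)]
              conv_rhs => rw [pvAltGo]
              simp [htab]
            | none =>
              have hW : pvNoCode (a :: b :: t) := by
                intro p hp hpre
                obtain ⟨h1, h2⟩ := List.cons_prefix_cons.mp hpre
                obtain ⟨h3, _⟩ := List.cons_prefix_cons.mp h2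
                exact table_none a b htab p hp ⟨h1, h3⟩
              have hcomp : pvComp ('%' :: a :: b :: t) = '%' :: pvComp (a :: b :: t) :=
                fold_miss pvTriples (fun p hp => hp) (a :: b :: t) hW
              rw [hcomp, ih (a :: b :: t) (by simp at hl ⊢; omega)]
              conv_rhs => rw [pvAltGo]
              simp [htab]
      · have hcomp : pvComp (c :: rest) = c :: pvComp rest := fold_cons_ne pvTriples c hc rest
        rw [hcomp, ih rest (by simp at hl; omega)]
        conv_rhs => rw [pvAltGo]
        simp [hc]

-- ===== VERDICT (by name: the statement is the Claim_ definition above) =====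
theorem decode_uri_for_hubspot_v3_py_spec : Claim_equal_decode_uri_for_hubspot_v3_py := by
  intro uri _
  unfold Spec_decode_uri_for_hubspot_v3_py decode_uri_for_hubspot_v3_py_alt
  rw [portA_eq, comp_eq_alt uri.toList.length uri.toList le_rfl]
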